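-- pv_equiv track=rewrite | github.com/dydhslxl7/Algorithm | programmers/python/etc.py | solution
-- ===== SOURCE A (Python) =====
-- def solution(arr):
--     stk = [arr[0]]
--     n = 1
--     while n < len(arr):
--         if len(stk) == 0 or arr[n] > stk[-1]:
--             stk.append(arr[n])
--             n += 1
--         else:
--             stk.pop()
--     return stk
-- ===== SOURCE B (Python) =====
-- def solution(arr):
--     # Right-to-left scan with a running suffix minimum: an element survives the
--     # monotonic-stack process iff it is strictly smaller than everything after it.
--     out = []
--     for x in reversed(arr):
--         if not out or x < out[-1]:
--             out.append(x)
--     out.reverse()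
--     return out
-- ===== Notes on version B (the rewrite author's own statement) =====
-- stated objective: faster
-- what changed: Replaces the push/pop monotonic stack with a single right-to-left pass keeping a running suffix minimum (an element survives A's stack iff it is strictly smaller than every later element), built back-to-front with no pops or stack mutation churn.
import Mathlib
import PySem

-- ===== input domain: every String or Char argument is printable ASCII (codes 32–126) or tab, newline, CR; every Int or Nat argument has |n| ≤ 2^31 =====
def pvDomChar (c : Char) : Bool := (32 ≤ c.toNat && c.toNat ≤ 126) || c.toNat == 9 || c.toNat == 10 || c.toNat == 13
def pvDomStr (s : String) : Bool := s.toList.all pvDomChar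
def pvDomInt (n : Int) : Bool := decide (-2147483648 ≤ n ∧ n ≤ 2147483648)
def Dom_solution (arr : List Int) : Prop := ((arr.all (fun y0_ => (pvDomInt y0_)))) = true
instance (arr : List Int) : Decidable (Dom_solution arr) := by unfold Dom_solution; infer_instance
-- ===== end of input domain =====

-- B replaces A's push/pop monotonic stack by a single right-to-left pass with a
-- running suffix minimum (alternative algorithm; on [] A raises IndexError, B returns []).

-- ===== PORT A =====
-- A's while loop: push-and-advance when stack empty or arr[n] > top, else pop (n unchanged).
def solutionLoop (arr : List Int) (stk : List Int) (n : Nat) : List Int :=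
  if _h : n < arr.length then
    if stk = [] ∨ stk.getLastD 0 < arr.getD n 0 then
      solutionLoop arr (stk ++ [arr.getD n 0]) (n + 1)
    else
      solutionLoop arr stk.dropLast n
  else stk
termination_by 2 * (arr.length - n) + stk.length
decreasing_by
  · simp; omega
  · have : stk ≠ [] := by rintro rfl; simp at *
    have : 0 < stk.length := List.length_pos_iff.mpr this
    simp [List.length_dropLast]; omega

def solution (arr : List Int) : List Int :=
  match arr with
  | [] => []          -- Python raises IndexError on arr[0]; excluded by Pre_solution
  | a :: _ => solutionLoop arr [a] 1

-- ===== PORT B =====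
-- for x in reversed(arr): if not out or x < out[-1]: out.append(x); then out.reverse()
def solution_alt (arr : List Int) : List Int :=
  (arr.reverse.foldl
    (fun out x => if out = [] ∨ x < out.getLastD 0 then out ++ [x] else out) []).reverse

-- ===== PRECONDITION & SPEC =====
-- Pre_ excludes exactly the empty list, on which Python A raises IndexError (arr[0]).
def Pre_solution (arr : List Int) : Prop := arr ≠ []
instance (arr : List Int) : Decidable (Pre_solution arr) := by unfold Pre_solution; infer_instance
def pvWitness_solution : List Int := [3, 1, 2]

def Spec_solution (arr : List Int) (out : List Int) : Prop := out = solution_alt arr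
instance (arr : List Int) (out : List Int) : Decidable (Spec_solution arr out) := by
  unfold Spec_solution; infer_instance

-- ===== CLAIM =====
def Claim_equal_solution : Prop :=
  ∀ (arr : List Int), Dom_solution arr → Pre_solution arr → Spec_solution arr (solution arr)
-- ===== LEMMAS AND PROOFS =====
-- A's pop phase as a function (proof helper; pops from the end while top ≥ x).
def popGE (stk : List Int) (x : Int) : List Int :=
  match _h : stk.getLast? with
  | some t => if x ≤ t then popGE stk.dropLast x else stk
  | none => stk
termination_by stk.length
decreasing_by
  have : stk ≠ [] := by rintro rfl; simp_all
  have : 0 < stk.length := List.length_pos_iff.mpr this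
  simp [List.length_dropLast]; omega

-- the right-to-left suffix-minimum scan, as a foldr (proof-side normal form of B)
def rScan (arr : List Int) : List Int :=
  arr.foldr (fun x acc => if acc = [] ∨ x < acc.headD 0 then x :: acc else acc) []

lemma rScan_cons (x : Int) (l : List Int) :
    rScan (x :: l) =
      if rScan l = [] ∨ x < (rScan l).headD 0 then x :: rScan l else rScan l := rfl

lemma solutionLoop_step (arr : List Int) :
    ∀ (k : Nat) (stk : List Int) (n : Nat), stk.length = k → n < arr.length →
    solutionLoop arr stk n =
      solutionLoop arr (popGE stk (arr.getD n 0) ++ [arr.getD n 0]) (n + 1) := by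
  intro k
  induction k with
  | zero =>
    intro stk n hk hn
    have hstk : stk = [] := List.length_eq_zero_iff.mp hk
    subst hstk
    rw [solutionLoop]
    simp [hn, popGE]
  | succ k ih =>
    intro stk n hk hn
    have hne : stk ≠ [] := by rintro rfl; simp at hk
    have hl : stk.getLast? = some (stk.getLastD 0) := by
      rw [List.getLastD_eq_getLast?]
      rcases h : stk.getLast? with _ | t
      · exact absurd (List.getLast?_eq_none_iff.mp h) hne
      · rfl
    rw [solutionLoop]
    by_cases hc : stk.getLastD 0 < arr.getD n 0
    · have hpop : popGE stk (arr.getD n 0) = stk := by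
        rw [popGE]
        split
        · next t heq =>
            have ht : t = stk.getLastD 0 := Option.some.inj ((hl.symm.trans heq).symm)
            rw [if_neg (by omega)]
        · rfl
      rw [dif_pos hn, if_pos (Or.inr hc), hpop]
    · have hcond : ¬ (stk = [] ∨ stk.getLastD 0 < arr.getD n 0) := by
        intro h; rcases h with h | h
        · exact hne h
        · exact hc h
      have hpop : popGE stk (arr.getD n 0) = popGE stk.dropLast (arr.getD n 0) := by
        rw [popGE]
        split
        · next t heq =>
            have ht : t = stk.getLastD 0 := Option.some.inj ((hl.symm.trans heq).symm)
            rw [if_pos (by omega)]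
        · next heq => rw [hl] at heq; cases heq
      rw [dif_pos hn, if_neg hcond, hpop]
      exact ih stk.dropLast n (by simp [List.length_dropLast, hk]) hn

lemma solutionLoop_foldl (arr : List Int) :
    ∀ (m : Nat) (n : Nat) (stk : List Int), arr.length - n = m →
    solutionLoop arr stk n =
      (arr.drop n).foldl (fun stk x => popGE stk x ++ [x]) stk := by
  intro m
  induction m with
  | zero =>
    intro n stk hm
    have hn : ¬ n < arr.length := by omega
    rw [solutionLoop, dif_neg hn]
    rw [List.drop_eq_nil_of_le (by omega)]
    rfl
  | succ m ih =>
    intro n stk hm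
    have hn : n < arr.length := by omega
    rw [solutionLoop_step arr stk.length stk n rfl hn]
    rw [ih (n + 1) _ (by omega)]
    rw [List.drop_eq_getElem_cons hn, List.foldl_cons]
    have : arr.getD n 0 = arr[n] := List.getD_eq_getElem arr 0 hn
    rw [this]

lemma takeWhile_append_single_neg (p : Int → Bool) (a : Int) (ha : p a = false)
    (l : List Int) : List.takeWhile p (l ++ [a]) = List.takeWhile p l := by
  induction l with
  | nil => simp [List.takeWhile, ha]
  | cons b t ih =>
      simp only [List.cons_append, List.takeWhile]
      cases p b <;> simp_all

lemma takeWhile_append_single_pos (p : Int → Bool) (a : Int) (ha : p a = true)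
    (l : List Int) (hl : ∀ x ∈ l, p x = true) :
    List.takeWhile p (l ++ [a]) = l ++ [a] := by
  apply List.takeWhile_eq_self_iff.mpr
  intro x hx
  rcases List.mem_append.mp hx with h | h
  · exact hl x h
  · simp only [List.mem_singleton] at h; subst h; exact ha

lemma takeWhile_takeWhile' (p q : Int → Bool) :
    ∀ l : List Int, List.takeWhile q (List.takeWhile p l)
      = List.takeWhile (fun a => p a && q a) l := by
  intro l
  induction l with
  | nil => rfl
  | cons b t ih =>
    simp only [List.takeWhile]
    cases hp : p b <;> cases hq : q b <;> simp [List.takeWhile, hq, ih]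

-- popGE on a strictly increasing stack is a takeWhile
lemma popGE_pairwise (x : Int) :
    ∀ (k : Nat) (stk : List Int), stk.length = k → List.Pairwise (· < ·) stk →
    popGE stk x = stk.takeWhile (fun t => decide (t < x)) := by
  intro k
  induction k with
  | zero =>
    intro stk hk _
    have hstk : stk = [] := List.length_eq_zero_iff.mp hk
    subst hstk; rw [popGE]; rfl
  | succ k ih =>
    intro stk hk hp
    have hne : stk ≠ [] := by rintro rfl; simp at hk
    rw [popGE]
    split
    · next t heq =>
      have hsplit : stk.dropLast ++ [t] = stk := List.dropLast_append_getLast? t heq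
      have hlt : ∀ y ∈ stk.dropLast, y < t := by
        intro y hy
        have hp' : List.Pairwise (· < ·) (stk.dropLast ++ [t]) := by rw [hsplit]; exact hp
        rcases List.pairwise_append.mp hp' with ⟨_, _, hrel⟩
        exact hrel y hy t (by simp)
      by_cases hx : x ≤ t
      · rw [if_pos hx]
        rw [ih stk.dropLast (by simp [List.length_dropLast, hk])
              (hp.sublist (List.dropLast_sublist _))]
        conv_rhs => rw [← hsplit]
        rw [takeWhile_append_single_neg _ t (by simp; omega)]
      · rw [if_neg hx]
        symm
        apply List.takeWhile_eq_self_iff.mpr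
        intro y hy
        rw [← hsplit] at hy
        rcases List.mem_append.mp hy with hymem | hyt
        · have := hlt y hymem; simp; omega
        · simp only [List.mem_singleton] at hyt; subst hyt; simp; omega
    · next heq =>
      exact absurd (List.getLast?_eq_none_iff.mp heq) hne

-- the head test of rScan means "smaller than the whole suffix"
lemma rScan_all : ∀ (l : List Int) (x : Int),
    (rScan l = [] ∨ x < (rScan l).headD 0) ↔ ∀ z ∈ l, x < z := by
  intro l
  induction l with
  | nil => intro x; simp [rScan]
  | cons y ys ih =>
    intro x
    rw [rScan_cons]
    by_cases hc : rScan ys = [] ∨ y < (rScan ys).headD 0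
    · rw [if_pos hc]
      have hy : ∀ z ∈ ys, y < z := (ih y).mp hc
      simp only [List.headD_cons]
      constructor
      · rintro (h | h)
        · exact absurd h (by simp)
        · intro z hz
          rcases List.mem_cons.mp hz with rfl | hz'
          · exact h
          · exact h.trans (hy z hz')
      · intro h
        exact Or.inr (h y (by simp))
    · rw [if_neg hc]
      obtain ⟨hne, hle⟩ : rScan ys ≠ [] ∧ ¬ y < (rScan ys).headD 0 :=
        ⟨fun h => hc (Or.inl h), fun h => hc (Or.inr h)⟩
      constructor
      · intro h
        have hall : ∀ z ∈ ys, x < z := (ih x).mp h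
        have hx_head : x < (rScan ys).headD 0 := by
          rcases h with h' | h'
          · exact absurd h' hne
          · exact h'
        have hxy : x < y := by omega
        intro z hz
        rcases List.mem_cons.mp hz with rfl | hz'
        · exact hxy
        · exact hall z hz'
      · intro h
        exact (ih x).mpr (fun z hz => h z (List.mem_cons_of_mem _ hz))

-- A's whole stack process, started from a strictly increasing stack
lemma foldl_pop_eq :
    ∀ (arr stk : List Int), List.Pairwise (· < ·) stk →
    arr.foldl (fun s x => popGE s x ++ [x]) stk
      = stk.takeWhile (fun t => arr.all (fun z => decide (t < z))) ++ rScan arr := by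
  intro arr
  induction arr with
  | nil =>
    intro stk _
    simp [rScan, List.takeWhile_eq_self_iff.mpr (fun x _ => rfl)]
  | cons x rest ih =>
    intro stk hp
    rw [List.foldl_cons]
    have hpop : popGE stk x = stk.takeWhile (fun t => decide (t < x)) :=
      popGE_pairwise x stk.length stk rfl hp
    have hp2 : List.Pairwise (· < ·)
        (stk.takeWhile (fun t => decide (t < x)) ++ [x]) := by
      rw [List.pairwise_append]
      refine ⟨hp.sublist (List.takeWhile_sublist _), by simp, ?_⟩
      intro a ha b hb
      simp only [List.mem_singleton] at hb; subst hb
      simpa using List.mem_takeWhile_imp ha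
    rw [hpop, ih _ hp2]
    by_cases hx : ∀ z ∈ rest, x < z
    · have hpx : rest.all (fun z => decide (x < z)) = true := by
        simp only [List.all_eq_true, decide_eq_true_eq]; exact hx
      rw [takeWhile_append_single_pos _ x hpx _ ?hl]
      case hl =>
        intro t ht
        have htx : t < x := by simpa using List.mem_takeWhile_imp ht
        simp only [List.all_eq_true, decide_eq_true_eq]
        exact fun z hz => htx.trans (hx z hz)
      rw [rScan_cons, if_pos ((rScan_all rest x).mpr hx)]
      have hpred : (fun t => (x :: rest).all (fun z => decide (t < z)))
          = (fun t => decide (t < x)) := by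
        funext t
        simp only [List.all_cons]
        by_cases htx : t < x
        · simp only [htx, decide_true, Bool.true_and, List.all_eq_true, decide_eq_true_eq]
          exact fun z hz => htx.trans (hx z hz)
        · simp [htx]
      rw [hpred]
      simp
    · have hpx : rest.all (fun z => decide (x < z)) = false := by
        cases h : rest.all (fun z => decide (x < z)) with
        | false => rfl
        | true =>
          exact absurd (fun z hz => by simpa using List.all_eq_true.mp h z hz) hx
      rw [takeWhile_append_single_neg _ x hpx, takeWhile_takeWhile']
      rw [rScan_cons, if_neg (fun hcon => hx ((rScan_all rest x).mp hcon))]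
      have hpr : (fun a => decide (a < x) && rest.all (fun z => decide (a < z)))
          = (fun t => (x :: rest).all (fun z => decide (t < z))) := by
        funext t; simp [List.all_cons]
      rw [hpr]

lemma popGE_nil (a : Int) : popGE [] a = [] := by rw [popGE]; rfl

lemma solution_eq_rScan (arr : List Int) (h : arr ≠ []) : solution arr = rScan arr := by
  rcases arr with _ | ⟨a, rest⟩
  · exact absurd rfl h
  · show solutionLoop (a :: rest) [a] 1 = _
    rw [solutionLoop_foldl (a :: rest) ((a :: rest).length - 1) 1 [a] rfl]
    have h1 : (a :: rest).drop 1 = rest := rfl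
    rw [h1]
    have h2 : rest.foldl (fun s x => popGE s x ++ [x]) [a]
        = (a :: rest).foldl (fun s x => popGE s x ++ [x]) [] := by
      rw [List.foldl_cons, popGE_nil]; rfl
    rw [h2, foldl_pop_eq (a :: rest) [] List.Pairwise.nil]
    simp

lemma foldr_rev_rScan : ∀ (l : List Int),
    l.foldr (fun x out => if out = [] ∨ x < out.getLastD 0 then out ++ [x] else out) []
      = (rScan l).reverse := by
  intro l
  induction l with
  | nil => simp [rScan]
  | cons x ys ih =>
    rw [List.foldr_cons, ih, rScan_cons]
    have hT : (rScan ys).reverse.getLastD 0 = (rScan ys).headD 0 := by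
      rw [List.getLastD_eq_getLast?, List.getLast?_reverse, List.headD_eq_head?]
    by_cases hc : rScan ys = [] ∨ x < (rScan ys).headD 0
    · have hc' : (rScan ys).reverse = [] ∨ x < (rScan ys).reverse.getLastD 0 := by
        rcases hc with h | h
        · exact Or.inl (by simp [h])
        · exact Or.inr (by rw [hT]; exact h)
      rw [if_pos hc', if_pos hc, List.reverse_cons]
    · have hc' : ¬ ((rScan ys).reverse = [] ∨ x < (rScan ys).reverse.getLastD 0) := by
        rintro (h | h)
        · exact hc (Or.inl (by simpa using h))
        · exact hc (Or.inr (by rw [← hT]; exact h))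
      rw [if_neg hc', if_neg hc]

lemma solution_alt_eq_rScan (arr : List Int) : solution_alt arr = rScan arr := by
  unfold solution_alt
  simp only [List.foldl_reverse]
  rw [foldr_rev_rScan, List.reverse_reverse]

-- ===== VERDICT =====
theorem solution_spec : Claim_equal_solution := by
  intro arr _ hpre
  unfold Spec_solution
  rw [solution_eq_rScan arr hpre, solution_alt_eq_rScan]
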